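-- pv_equiv track=rewrite | github.com/Ekaterina-02/python_labs | src/lab03/lab_03A-3.py | count_freq
-- ===== SOURCE A (Python) =====
-- def count_freq(tokens: list[str]) -> dict[str, int]:
--     result={}
--     for i in tokens:
--         result[i]=result.get(i, 0)+1
--     sorted_dict={}
--     s=sorted(result.keys())
--     for key in s:
--         sorted_dict[key]=result[key]
--     return sorted_dict
-- ===== SOURCE B (Python) =====
-- def count_freq(tokens: list[str]) -> dict[str, int]:
--     # Sort first, then scan once, counting each run of equal tokens;
--     # no intermediate frequency hashmap is built.
--     out = {}
--     prev = None
--     cnt = 0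
--     for t in sorted(tokens):
--         if prev == t:
--             cnt += 1
--         else:
--             if prev is not None:
--                 out[prev] = cnt
--             prev = t
--             cnt = 1
--     if prev is not None:
--         out[prev] = cnt
--     return out
-- ===== Notes on version B (the rewrite author's own statement) =====
-- stated objective: alternative
-- what changed: Replaces A's frequency hashmap (build dict of counts, sort its keys, rebuild a new dict by lookup) with a single run-grouping scan over the sorted token list that maintains only the current run's token and length and emits each run directly.
import Mathlib
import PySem

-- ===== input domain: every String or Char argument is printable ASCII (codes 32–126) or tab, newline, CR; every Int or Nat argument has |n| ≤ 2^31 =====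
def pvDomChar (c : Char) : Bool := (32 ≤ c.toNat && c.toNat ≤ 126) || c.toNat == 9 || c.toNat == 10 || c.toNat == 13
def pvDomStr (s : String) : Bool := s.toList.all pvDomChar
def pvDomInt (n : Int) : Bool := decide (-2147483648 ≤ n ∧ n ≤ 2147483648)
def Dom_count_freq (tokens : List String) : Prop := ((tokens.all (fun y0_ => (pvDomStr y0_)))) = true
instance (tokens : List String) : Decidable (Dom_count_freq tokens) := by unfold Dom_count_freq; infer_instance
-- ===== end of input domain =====

-- B replaces A's count-dict + key-sort + rebuild with one run-grouping scan of the
-- sorted token list (objective: alternative; same asymptotic cost).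

-- ===== PORT A =====
def count_freq (tokens : List String) : List (String × Int) :=
  let result := tokens.foldl (fun d i => d.insert i (d.getD i 0 + 1)) PySem.Dict.empty
  let s := PySem.List.sorted result.keys (fun x => x) false
  -- result[key]: every key in s is a key of result, so getD is exact here
  let sorted_dict := s.foldl (fun d key => d.insert key (result.getD key 0)) PySem.Dict.empty
  sorted_dict.items

-- ===== PORT B =====
-- one step of the scan: state = (output dict, current run's token (None before the first), run length)
def cfStep (st : PySem.Dict String Int × Option String × Int) (t : String) :
    PySem.Dict String Int × Option String × Int :=
  match st.2.1 with
  | some p => if p = t then (st.1, some p, st.2.2 + 1)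
              else (st.1.insert p st.2.2, some t, 1)
  | none => (st.1, some t, 1)

-- 'if prev is not None: out[prev] = cnt' after the loop
def cfFlush (st : PySem.Dict String Int × Option String × Int) : PySem.Dict String Int :=
  match st.2.1 with
  | some p => st.1.insert p st.2.2
  | none => st.1

def count_freq_alt (tokens : List String) : List (String × Int) :=
  (cfFlush ((PySem.List.sorted tokens (fun x => x) false).foldl cfStep
      (PySem.Dict.empty, none, 0))).items

-- ===== PRECONDITION & SPEC =====
def Spec_count_freq (tokens : List String) (out : List (String × Int)) : Prop := out = count_freq_alt tokens
instance (tokens : List String) (out : List (String × Int)) : Decidable (Spec_count_freq tokens out) := by unfold Spec_count_freq; infer_instance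

-- ===== CLAIM (what is proved, stated in full; the proofs are below) =====
def Claim_equal_count_freq : Prop := ∀ (tokens : List String), Dom_count_freq tokens → Spec_count_freq tokens (count_freq tokens)

-- ===== LEMMAS AND PROOFS =====

-- the common canonical value: distinct tokens in increasing order, each with its count
def cfCanon (tokens : List String) : List (String × Int) :=
  (PySem.List.sorted (PySem.Set.ofList tokens) (fun x => x) false).map
    (fun k => (k, (List.count k tokens : Int)))

-- folding Set.add over elements all distinct from the head keeps the head in front
theorem foldl_add_cons_of_ne (l : List String) : ∀ (s : List String) (a : String),
    (∀ b ∈ l, b ≠ a) →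
    l.foldl PySem.Set.add (a :: s) = a :: l.foldl PySem.Set.add s := by
  induction l with
  | nil => intro s a _; rfl
  | cons b l ih =>
    intro s a h
    have hba : b ≠ a := h b (by simp)
    have : PySem.Set.add (a :: s) b = a :: PySem.Set.add s b := by
      simp only [PySem.Set.add, PySem.Set.contains]
      simp [hba]
      split <;> rfl
    simp only [List.foldl_cons, this]
    exact ih _ a (fun x hx => h x (by simp [hx]))

-- folding Set.add ignores elements already present
theorem foldl_add_filter_ne (l : List String) : ∀ (s : List String) (a : String),
    a ∈ s →
    l.foldl PySem.Set.add s = (l.filter (fun b => b ≠ a)).foldl PySem.Set.add s := by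
  induction l with
  | nil => intro s a _; rfl
  | cons b l ih =>
    intro s a ha
    by_cases hba : b = a
    · subst hba
      have hadd : PySem.Set.add s b = s := by
        simp [PySem.Set.add, PySem.Set.contains, ha]
      rw [List.foldl_cons, hadd, List.filter_cons_of_neg (by simp)]
      exact ih s b ha
    · have ha' : a ∈ PySem.Set.add s b := by
        rw [PySem.Set.mem_add]; exact Or.inl ha
      rw [List.foldl_cons, List.filter_cons_of_pos (by simp [hba]), List.foldl_cons]
      exact ih _ a ha'

-- set(a :: l) = a followed by set(l with a removed)
theorem ofList_cons (a : String) (l : List String) :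
    PySem.Set.ofList (a :: l) = a :: PySem.Set.ofList (l.filter (fun b => b ≠ a)) := by
  have h0 : PySem.Set.add ([] : List String) a = [a] := by
    simp [PySem.Set.add, PySem.Set.contains]
  rw [PySem.Set.ofList_eq_foldl, PySem.Set.ofList_eq_foldl, List.foldl_cons, h0]
  rw [foldl_add_filter_ne l [a] a (by simp)]
  exact foldl_add_cons_of_ne _ [] a (fun b hb => by
    have := List.of_mem_filter hb; simpa using this)

-- set() of a ≤-sorted list is strictly increasing
theorem ofList_pairwise_lt_aux : ∀ (n : Nat) (l : List String), l.length ≤ n →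
    l.Pairwise (· ≤ ·) → (PySem.Set.ofList l).Pairwise (· < ·) := by
  intro n
  induction n with
  | zero =>
    intro l hl _
    have : l = [] := List.eq_nil_of_length_eq_zero (Nat.le_zero.mp hl)
    subst this; simp [PySem.Set.ofList]
  | succ n ih =>
    intro l hl hp
    match l with
    | [] => simp [PySem.Set.ofList]
    | a :: l' =>
      rw [ofList_cons]
      constructor
      · intro k hk
        have hk' := (PySem.Set.mem_ofList _ k).mp hk
        have hkl : k ∈ l' := List.mem_of_mem_filter hk'
        have hne : k ≠ a := by
          have := List.of_mem_filter hk'; simpa using this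
        exact lt_of_le_of_ne (List.rel_of_pairwise_cons hp hkl) (Ne.symm hne)
      · exact ih (l'.filter (fun b => b ≠ a))
          (le_trans (List.length_filter_le _ _) (Nat.le_of_succ_le_succ hl))
          ((List.pairwise_cons.mp hp).2.filter _)

-- ===== A-side: count_freq computes the canonical value =====
theorem count_freq_eq_canon (tokens : List String) : count_freq tokens = cfCanon tokens := by
  unfold count_freq cfCanon
  dsimp only
  rw [PySem.Dict.foldl_insert_getD_add_one_eq_counter, PySem.Dict.keys_counter]
  set S := PySem.List.sorted (PySem.Set.ofList tokens) (fun x => x) false with hS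
  have hnd : S.Nodup := (PySem.List.sorted_perm _ _ _).nodup_iff.mpr (PySem.Set.nodup_ofList tokens)
  rw [PySem.Dict.items_foldl_insert_fresh S (fun k => k)
        (fun key => (PySem.Dict.counter tokens).getD key 0) PySem.Dict.empty
        (fun a _ => PySem.Dict.contains_empty a) (by simpa using hnd)]
  simp only [List.nil_append, PySem.Dict.empty]
  exact List.map_congr_left (fun k _ => by rw [PySem.Dict.getD_counter])

-- ===== B-side: the run-grouping scan computes the canonical value =====
-- invariant of the scan: from state (d, some p, c), with the remaining input sorted,
-- ≥ p, and all keys fresh, it appends p's final count then one entry per later run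
theorem cfRun (rest : List String) : ∀ (p : String) (d : PySem.Dict String Int) (c : Int),
    rest.Pairwise (· ≤ ·) → (∀ t ∈ rest, p ≤ t) →
    (∀ t ∈ rest, d.contains t = false) → d.contains p = false →
    (cfFlush (rest.foldl cfStep (d, some p, c))).items
      = d.items ++ (p, c + (List.count p rest : Int)) ::
        (PySem.Set.ofList (rest.filter (fun t => t ≠ p))).map
          (fun k => (k, (List.count k rest : Int))) := by
  induction rest with
  | nil =>
    intro p d c _ _ _ hdp
    simp [cfFlush, PySem.Dict.items_insert_of_not_contains d c hdp, PySem.Set.ofList]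
  | cons t rest ih =>
    intro p d c hp hle hfresh hdp
    by_cases hpt : p = t
    · subst hpt
      have hstep : cfStep (d, some p, c) p = (d, some p, c + 1) := by simp [cfStep]
      rw [List.foldl_cons, hstep]
      rw [ih p d (c + 1) (List.pairwise_cons.mp hp).2
            (fun s hs => List.rel_of_pairwise_cons hp hs)
            (fun s hs => hfresh s (by simp [hs])) hdp]
      congr 1
      congr 1
      · simp [List.count_cons_self]; omega
      · have hfil : (p :: rest).filter (fun t => t ≠ p) = rest.filter (fun t => t ≠ p) := by
          simp
        rw [← hfil]
        apply List.map_congr_left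
        intro k hk
        have hk' := (PySem.Set.mem_ofList _ k).mp hk
        have hne : k ≠ p := by have := List.of_mem_filter hk'; simpa using this
        simp [hne.symm]  -- count over p :: rest for k ≠ p
    · have hptlt : p < t := lt_of_le_of_ne (hle t (by simp)) hpt
      have hrest_gt : ∀ s ∈ rest, p < s :=
        fun s hs => lt_of_lt_of_le hptlt (List.rel_of_pairwise_cons hp hs)
      have hstep : cfStep (d, some p, c) t = (d.insert p c, some t, 1) := by
        simp [cfStep, hpt]
      rw [List.foldl_cons, hstep]
      rw [ih t (d.insert p c) 1 (List.pairwise_cons.mp hp).2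
            (fun s hs => List.rel_of_pairwise_cons hp hs)
            (fun s hs => by
              rw [PySem.Dict.contains_insert]
              have h1 : d.contains s = false := hfresh s (by simp [hs])
              have h2 : s ≠ p := ne_of_gt (hrest_gt s hs)
              simp [h1, h2])
            (by
              rw [PySem.Dict.contains_insert]
              have h1 : d.contains t = false := hfresh t (by simp)
              simp [h1, Ne.symm hpt])]
      rw [PySem.Dict.items_insert_of_not_contains d c hdp]
      have hcp : List.count p (t :: rest) = 0 := by
        rw [List.count_eq_zero]
        intro hmem
        rcases List.mem_cons.mp hmem with h | h
        · exact hpt h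
        · exact absurd rfl (ne_of_gt (hrest_gt p h))
      have hfil : (t :: rest).filter (fun s => s ≠ p) = t :: rest := by
        rw [List.filter_eq_self]
        intro s hs
        rcases List.mem_cons.mp hs with h | h
        · simp [h, Ne.symm hpt]
        · simp [ne_of_gt (hrest_gt s h)]
      rw [hcp, hfil, ofList_cons]
      simp only [List.append_assoc, List.cons_append, List.nil_append]
      congr 1
      congr 1
      · norm_num
      rw [List.map_cons]
      congr 1
      · simp [List.count_cons_self]; omega
      · apply List.map_congr_left
        intro k hk
        have hk' := (PySem.Set.mem_ofList _ k).mp hk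
        have hne : k ≠ t := by have := List.of_mem_filter hk'; simpa using this
        simp [hne.symm]

theorem count_freq_alt_eq_canon (tokens : List String) : count_freq_alt tokens = cfCanon tokens := by
  unfold count_freq_alt cfCanon
  set st := PySem.List.sorted tokens (fun x => x) false with hst
  have hperm : st.Perm tokens := PySem.List.sorted_perm tokens (fun x => x) false
  have hpw : st.Pairwise (· ≤ ·) := PySem.List.sorted_pairwise tokens (fun x => x)
  match hcase : st with
  | [] =>
    have htok : tokens = [] := (PySem.List.sorted_eq_nil_iff tokens (fun x => x) false).mp hcase
    subst htok
    simp [cfFlush, PySem.Dict.empty, PySem.Set.ofList, PySem.List.sorted]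
  | x :: rest =>
    have h1 : cfStep (PySem.Dict.empty, none, 0) x = (PySem.Dict.empty, some x, 1) := rfl
    rw [List.foldl_cons, h1,
        cfRun rest x PySem.Dict.empty 1 (List.pairwise_cons.mp hpw).2
          (fun t ht => List.rel_of_pairwise_cons hpw ht)
          (fun t _ => PySem.Dict.contains_empty t) (PySem.Dict.contains_empty x)]
    -- the sorted distinct tokens are x followed by set(rest with x removed)
    have hSeq : PySem.List.sorted (PySem.Set.ofList tokens) (fun x => x) false
        = x :: PySem.Set.ofList (rest.filter (fun b => b ≠ x)) := by
      apply PySem.List.sorted_eq_of_perm_of_pairwise_lt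
      · rw [List.perm_ext_iff_of_nodup]
        · intro a
          rw [PySem.Set.mem_ofList]
          constructor
          · intro ha
            rcases List.mem_cons.mp ha with h | h
            · exact hperm.mem_iff.mp (h ▸ List.mem_cons_self)
            · have := List.mem_of_mem_filter ((PySem.Set.mem_ofList _ a).mp h)
              exact hperm.mem_iff.mp (List.mem_cons_of_mem _ this)
          · intro ha
            have := hperm.mem_iff.mpr ha
            rcases List.mem_cons.mp this with h | h
            · exact h ▸ List.mem_cons_self
            · by_cases hax : a = x
              · exact hax ▸ List.mem_cons_self
              · exact List.mem_cons_of_mem _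
                  ((PySem.Set.mem_ofList _ a).mpr (List.mem_filter.mpr ⟨h, by simp [hax]⟩))
        · rw [List.nodup_cons]
          constructor
          · intro hx
            have := List.of_mem_filter ((PySem.Set.mem_ofList _ x).mp hx)
            simp at this
          · exact PySem.Set.nodup_ofList _
        · exact PySem.Set.nodup_ofList tokens
      · constructor
        · intro k hk
          have hk' := (PySem.Set.mem_ofList _ k).mp hk
          have hkl : k ∈ rest := List.mem_of_mem_filter hk'
          have hne : k ≠ x := by have := List.of_mem_filter hk'; simpa using this
          exact lt_of_le_of_ne (List.rel_of_pairwise_cons hpw hkl) (Ne.symm hne)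
        · exact ofList_pairwise_lt_aux (rest.filter (fun b => b ≠ x)).length _ le_rfl
            ((List.pairwise_cons.mp hpw).2.filter _)
    rw [hSeq, List.map_cons]
    have hemp : (PySem.Dict.empty : PySem.Dict String Int).items = [] := rfl
    rw [hemp, List.nil_append]
    congr 1
    · have : List.count x tokens = List.count x (x :: rest) := (hperm.count_eq x).symm
      rw [this, List.count_cons_self]
      refine congrArg (fun n => (x, n)) ?_
      push_cast
      ring
    · apply List.map_congr_left
      intro k hk
      have hk' := (PySem.Set.mem_ofList _ k).mp hk
      have hne : k ≠ x := by have := List.of_mem_filter hk'; simpa using this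
      have : List.count k tokens = List.count k (x :: rest) := (hperm.count_eq k).symm
      simp [this, hne.symm]

-- ===== VERDICT (by name: the statement is the Claim_ definition above) =====
theorem count_freq_spec : Claim_equal_count_freq := by
  intro tokens _
  unfold Spec_count_freq
  rw [count_freq_eq_canon, count_freq_alt_eq_canon]
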